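-- pv_equiv track=rewrite | github.com/Hydrion-Qlz/deepLearningHomework | houseNumberRecognition/calc_accuracy.py | compare_result
-- ===== SOURCE A (Python) =====
-- def compare_result(true_label, predict_label):
--     if len(true_label) != len(predict_label):
--         return False
--     if len(true_label) == 1:
--         return true_label == predict_label
--
--     true_label = sorted(true_label)
--     predict_label = sorted(predict_label)
--     for true_item, false_item in zip(true_label, predict_label):
--         if true_item != false_item:
--             return False
--     return True
-- ===== SOURCE B (Python) =====
-- def compare_result(true_label, predict_label):
--     if len(true_label) != len(predict_label):
--         return False
--     counts = {}
--     for x in true_label: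
--         counts[x] = counts.get(x, 0) + 1
--     for y in predict_label:
--         c = counts.get(y, 0)
--         if c == 0:
--             return False
--         counts[y] = c - 1
--     return True
-- ===== Notes on version B (the rewrite author's own statement) =====
-- stated objective: alternative
-- what changed: Replaces sort-both-then-zip-compare with a single hash-count pass: build a frequency dict of true_label, then decrement it while scanning predict_label, failing on any exhausted count.
import Mathlib
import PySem

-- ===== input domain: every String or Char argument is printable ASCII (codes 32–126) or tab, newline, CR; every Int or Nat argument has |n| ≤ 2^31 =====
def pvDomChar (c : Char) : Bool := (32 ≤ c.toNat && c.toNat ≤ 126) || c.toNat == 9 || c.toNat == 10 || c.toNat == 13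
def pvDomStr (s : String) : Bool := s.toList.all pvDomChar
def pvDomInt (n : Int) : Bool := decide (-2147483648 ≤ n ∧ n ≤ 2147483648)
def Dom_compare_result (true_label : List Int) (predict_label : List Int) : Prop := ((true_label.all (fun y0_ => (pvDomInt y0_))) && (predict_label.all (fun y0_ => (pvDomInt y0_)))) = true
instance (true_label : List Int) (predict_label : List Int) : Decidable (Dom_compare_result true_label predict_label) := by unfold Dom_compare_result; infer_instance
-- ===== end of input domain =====

-- B replaces sort-both-then-zip-compare with one counting dict built from true_label and
-- decremented along predict_label (alternative algorithm, same return value everywhere).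

-- ===== PORT A =====
-- the early-return for-loop over zip(sorted, sorted)
def crZipLoop : List (Int × Int) → Bool
  | [] => true
  | (true_item, false_item) :: rest =>
    if true_item ≠ false_item then false else crZipLoop rest

def compare_result (true_label : List Int) (predict_label : List Int) : Bool :=
  if true_label.length ≠ predict_label.length then false
  else if true_label.length = 1 then decide (true_label = predict_label)
  else
    crZipLoop (List.zip (PySem.List.sorted true_label (fun x => x) false)
                        (PySem.List.sorted predict_label (fun x => x) false))

-- ===== PORT B =====
-- counts = {}; for x in true_label: counts[x] = counts.get(x, 0) + 1
def crCountUp (true_label : List Int) : PySem.Dict Int Int :=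
  true_label.foldl (fun d x => d.insert x (d.getD x 0 + 1)) PySem.Dict.empty

-- for y in predict_label: c = counts.get(y, 0); if c == 0: return False; counts[y] = c - 1
def crConsume : PySem.Dict Int Int → List Int → Bool
  | _, [] => true
  | d, y :: rest =>
    let c := d.getD y 0
    if c = 0 then false else crConsume (d.insert y (c - 1)) rest

def compare_result_alt (true_label : List Int) (predict_label : List Int) : Bool :=
  if true_label.length ≠ predict_label.length then false
  else crConsume (crCountUp true_label) predict_label

-- ===== PRECONDITION & SPEC =====
def Spec_compare_result (true_label : List Int) (predict_label : List Int) (out : Bool) : Prop := out = compare_result_alt true_label predict_label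
instance (true_label : List Int) (predict_label : List Int) (out : Bool) : Decidable (Spec_compare_result true_label predict_label out) := by unfold Spec_compare_result; infer_instance

-- ===== CLAIM (what is proved, stated in full; the proofs are below) =====
def Claim_equal_compare_result : Prop := ∀ (true_label : List Int) (predict_label : List Int), Dom_compare_result true_label predict_label → Spec_compare_result true_label predict_label (compare_result true_label predict_label)

-- ===== LEMMAS AND PROOFS =====

-- A's zip loop over equal-length lists is list equality
theorem crZipLoop_eq (xs : List Int) : ∀ ys : List Int, xs.length = ys.length →
    crZipLoop (List.zip xs ys) = decide (xs = ys) := by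
  induction xs with
  | nil => intro ys h; cases ys <;> simp_all [crZipLoop]
  | cons a t ih =>
    intro ys h
    cases ys with
    | nil => simp at h
    | cons b u =>
      simp only [List.zip_cons_cons, crZipLoop]
      by_cases hab : a = b
      · subst hab
        simp only [ne_eq, not_true_eq_false, if_false]
        rw [ih u (by simpa using h)]
        simp
      · simp [hab]

-- B's decrement loop, on a dict whose lookups are the counts of s, decides ↑p ≤ ↑s (multisets)
theorem crConsume_eq (p : List Int) : ∀ (s : List Int) (d : PySem.Dict Int Int),
    (∀ x, d.getD x 0 = (s.count x : Int)) →
    crConsume d p = decide ((p : Multiset Int) ≤ (s : Multiset Int)) := by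
  induction p with
  | nil => intro s d _; simp [crConsume]
  | cons y rest ih =>
    intro s d hd
    simp only [crConsume, hd y]
    by_cases hz : (s.count y : Int) = 0
    · have hcy : s.count y = 0 := by exact_mod_cast hz
      have : ¬ ((↑(y :: rest) : Multiset Int) ≤ ↑s) := by
        intro hle
        have := Multiset.count_le_of_le y hle
        simp [hcy] at this
      simp [hz, this]
    · have hcy : 0 < s.count y := Nat.pos_of_ne_zero (by exact_mod_cast hz)
      have hmem : y ∈ s := List.count_pos_iff.mp hcy
      rw [if_neg hz]
      have hstep : ∀ x, ((d.insert y ((s.count y : Int) - 1)).getD x 0) = ((s.erase y).count x : Int) := by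
        intro x
        rw [PySem.Dict.getD_insert]
        by_cases hx : x = y
        · subst hx
          rw [if_pos rfl, List.count_erase_self]
          have h1 : 1 ≤ s.count x := hcy
          rw [Nat.cast_sub h1]
          push_cast
          ring
        · rw [if_neg hx, hd x, List.count_erase_of_ne hx]
      rw [ih (s.erase y) _ hstep]
      have hys : y ∈ (↑s : Multiset Int) := by simpa using hmem
      have hiff : ((↑rest : Multiset Int) ≤ ↑(s.erase y)) ↔ ((↑(y :: rest) : Multiset Int) ≤ ↑s) := by
        rw [← Multiset.coe_erase, ← Multiset.cons_coe]
        constructor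
        · intro h
          have h2 := Multiset.cons_le_cons y h
          rwa [Multiset.cons_erase hys] at h2
        · intro h
          have h2 := Multiset.erase_le_erase y h
          rwa [Multiset.erase_cons_head] at h2
      simp [hiff]

theorem crCountUp_getD (t : List Int) (x : Int) : (crCountUp t).getD x 0 = (t.count x : Int) := by
  unfold crCountUp
  rw [PySem.Dict.getD_foldl_insert_add_one]
  simp

-- with equal lengths, ↑p ≤ ↑t is multiset equality, i.e. sorted equality
theorem crMain (t p : List Int) (hl : t.length = p.length) :
    decide ((p : Multiset Int) ≤ (t : Multiset Int)) = decide (t.Perm p) := by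
  by_cases hperm : t.Perm p
  · have : (↑p : Multiset Int) = ↑t := Multiset.coe_eq_coe.mpr hperm.symm
    simp [hperm, this]
  · have : ¬ ((↑p : Multiset Int) ≤ ↑t) := by
      intro hle
      have hcard : Multiset.card (↑t : Multiset Int) ≤ Multiset.card (↑p : Multiset Int) := by
        simp [hl]
      have := Multiset.eq_of_le_of_card_le hle hcard
      exact hperm (Multiset.coe_eq_coe.mp this).symm
    simp [hperm, this]

-- ===== VERDICT (by name: the statement is the Claim_ definition above) =====
theorem compare_result_spec : Claim_equal_compare_result := by
  intro t p _
  unfold Spec_compare_result compare_result compare_result_alt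
  by_cases hl : t.length = p.length
  · have hsl : (PySem.List.sorted t (fun x => x) false).length
        = (PySem.List.sorted p (fun x => x) false).length := by
      rw [PySem.List.length_sorted, PySem.List.length_sorted, hl]
    rw [crConsume_eq p t (crCountUp t) (crCountUp_getD t), crMain t p hl]
    have hne : ¬ t.length ≠ p.length := not_not_intro hl
    rw [if_neg hne, if_neg hne]
    by_cases h1 : t.length = 1
    · rw [if_pos h1]
      obtain ⟨a, rfl⟩ : ∃ a, t = [a] := by
        cases t with
        | nil => simp at h1
        | cons a u => cases u with
          | nil => exact ⟨a, rfl⟩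
          | cons b v => simp at h1
      cases p with
      | nil => simp at hl
      | cons b u =>
        cases u with
        | nil => simp [List.perm_singleton]
        | cons c v => simp at hl
    · rw [if_neg h1]
      rw [crZipLoop_eq _ _ hsl]
      simp only [decide_eq_decide]
      exact PySem.List.sorted_id_eq_sorted_id_iff_perm (xs := t) (ys := p)
  · rw [if_pos (by simp [hl]), if_pos (by simp [hl])]
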